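-- pv_equiv track=rewrite | github.com/zhukoedov/Lab-3 | keygen.py | str_to_part_of_key
-- ===== SOURCE A (Python) =====
-- A = 65
--
-- Z = 90
--
-- a = 97
--
-- z = 122
--
-- def str_to_part_of_key(source_str):
--     ans = 0
--     for char in source_str:
--         ans *= 10
--         char = ord(char)
--         if char >= A and char <= Z:
--             ans += (char - 64) % 10
--         if char >= a and char <= z:
--             ans += (char - 96) % 10
--     return ans
-- ===== SOURCE B (Python) =====
-- A = 65
-- Z = 90
-- a = 97
-- z = 122
--
-- def _digit(char):
--     o = ord(char)
--     if A <= o <= Z: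
--         return (o - 64) % 10
--     if a <= o <= z:
--         return (o - 96) % 10
--     return 0
--
-- def str_to_part_of_key(source_str):
--     digits = [_digit(c) for c in source_str]
--     ans = 0
--     pow10 = 1
--     for d in reversed(digits):
--         ans += d * pow10
--         pow10 *= 10
--     return ans
-- ===== Notes on version B (the rewrite author's own statement) =====
-- stated objective: alternative
-- what changed: Replaces A's single Horner-style multiply-accumulate loop over characters with a two-phase decomposition: first map every character to its digit, then accumulate the positional sum by scanning the digit list back-to-front with a running power of ten.
import Mathlib
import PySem

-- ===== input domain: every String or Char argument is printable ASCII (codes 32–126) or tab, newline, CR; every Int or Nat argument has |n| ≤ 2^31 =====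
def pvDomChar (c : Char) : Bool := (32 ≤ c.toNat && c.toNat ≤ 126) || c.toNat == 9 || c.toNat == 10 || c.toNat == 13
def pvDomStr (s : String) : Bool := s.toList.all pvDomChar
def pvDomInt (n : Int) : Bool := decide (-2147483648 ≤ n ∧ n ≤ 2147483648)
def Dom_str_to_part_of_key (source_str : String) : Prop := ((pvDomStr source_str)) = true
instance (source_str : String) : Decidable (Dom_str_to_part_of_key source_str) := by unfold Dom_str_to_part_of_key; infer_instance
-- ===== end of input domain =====

-- B replaces A's Horner-style running multiply-accumulate with a two-phase map-digits-then-positional-sum decomposition (alternative, same cost).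


-- ===== PORT A =====
def str_to_part_of_key (source_str : String) : Int :=
  source_str.toList.foldl (fun ans char =>
    let ans := ans * 10
    let ch : Int := char.toNat
    let ans := if 65 ≤ ch ∧ ch ≤ 90 then ans + PySem.Int.mod (ch - 64) 10 else ans
    let ans := if 97 ≤ ch ∧ ch ≤ 122 then ans + PySem.Int.mod (ch - 96) 10 else ans
    ans) 0

-- ===== PORT B =====
def pvDigit (char : Char) : Int :=
  let o : Int := char.toNat
  if 65 ≤ o ∧ o ≤ 90 then PySem.Int.mod (o - 64) 10
  else if 97 ≤ o ∧ o ≤ 122 then PySem.Int.mod (o - 96) 10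
  else 0

def str_to_part_of_key_alt (source_str : String) : Int :=
  let digits := source_str.toList.map pvDigit
  (digits.reverse.foldl (fun st d => (st.1 + d * st.2, st.2 * 10)) ((0 : Int), (1 : Int))).1

-- ===== PRECONDITION & SPEC =====
def Spec_str_to_part_of_key (source_str : String) (out : Int) : Prop := out = str_to_part_of_key_alt source_str
instance (source_str : String) (out : Int) : Decidable (Spec_str_to_part_of_key source_str out) := by unfold Spec_str_to_part_of_key; infer_instance

-- ===== CLAIM (what is proved, stated in full; the proofs are below) =====
def Claim_equal_str_to_part_of_key : Prop := ∀ (source_str : String), Dom_str_to_part_of_key source_str → Spec_str_to_part_of_key source_str (str_to_part_of_key source_str)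

-- ===== LEMMAS AND PROOFS =====

-- A's loop body equals "times 10 plus the digit of the character".
theorem pv_step_eq (ans : Int) (c : Char) :
    (if 97 ≤ (c.toNat : Int) ∧ (c.toNat : Int) ≤ 122 then
       (if 65 ≤ (c.toNat : Int) ∧ (c.toNat : Int) ≤ 90 then
          ans * 10 + PySem.Int.mod ((c.toNat : Int) - 64) 10 else ans * 10)
         + PySem.Int.mod ((c.toNat : Int) - 96) 10
     else
       if 65 ≤ (c.toNat : Int) ∧ (c.toNat : Int) ≤ 90 then
         ans * 10 + PySem.Int.mod ((c.toNat : Int) - 64) 10 else ans * 10)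
    = ans * 10 + pvDigit c := by
  simp only [pvDigit]
  split_ifs with h1 h2 h3
  · exfalso; omega
  all_goals ring

-- A's char loop computes the Horner value of the mapped digits.
theorem pv_foldA (l : List Char) (a : Int) :
    l.foldl (fun ans char =>
      let ans := ans * 10
      let ch : Int := char.toNat
      let ans := if 65 ≤ ch ∧ ch ≤ 90 then ans + PySem.Int.mod (ch - 64) 10 else ans
      let ans := if 97 ≤ ch ∧ ch ≤ 122 then ans + PySem.Int.mod (ch - 96) 10 else ans
      ans) a = (l.map pvDigit).foldl (fun x d => x * 10 + d) a := by
  induction l generalizing a with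
  | nil => rfl
  | cons c t ih =>
      simp only [List.foldl_cons, List.map_cons]
      rw [← ih]
      congr 1
      exact pv_step_eq a c

-- B's reverse scan with a running power: invariant over any start state.
theorem pv_foldB (ds : List Int) (a p : Int) :
    (ds.reverse.foldl (fun st d => (st.1 + d * st.2, st.2 * 10)) (a, p)).1
      = a + p * ds.foldl (fun x d => x * 10 + d) 0 := by
  induction ds using List.reverseRecOn generalizing a p with
  | nil => simp
  | append_singleton t d ih =>
      rw [List.reverse_append]
      simp only [List.reverse_cons, List.reverse_nil, List.nil_append, List.foldl_cons,
        List.foldl_append, List.foldl_nil]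
      rw [ih]
      ring

-- ===== VERDICT (by name: the statement is the Claim_ definition above) =====
theorem str_to_part_of_key_spec : Claim_equal_str_to_part_of_key := by
  intro s _
  unfold Spec_str_to_part_of_key str_to_part_of_key str_to_part_of_key_alt
  rw [pv_foldA, pv_foldB]
  ring
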